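-- pv_equiv track=rewrite | github.com/projectcauchy/ProjectCauchy | game-server/games/poker/hand_evaluation.py | get_full_house_high_cards
-- ===== SOURCE A (Python) =====
-- from typing import List, Tuple
--
-- ranks = ['2', '3', '4', '5', '6', '7', '8', '9', 'T', 'J', 'Q', 'K', 'A']
--
-- rank_values = {rank: index for index, rank in enumerate(ranks, start=2)}
--
-- def get_full_house_high_cards(cards: List[str]) -> List[int]:
--     ranks_in_hand = [card[:-1] for card in cards]
--     three_of_a_kind = None
--     pair = None
--     for rank in ranks:
--         if ranks_in_hand.count(rank) == 3:
--             three_of_a_kind = rank_values[rank]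
--         elif ranks_in_hand.count(rank) == 2:
--             pair = rank_values[rank]
--     return [three_of_a_kind, pair]
-- ===== SOURCE B (Python) =====
-- from typing import List, Tuple
--
-- ranks = ['2', '3', '4', '5', '6', '7', '8', '9', 'T', 'J', 'Q', 'K', 'A']
--
-- rank_values = {rank: index for index, rank in enumerate(ranks, start=2)}
--
-- def get_full_house_high_cards(cards: List[str]) -> List[int]:
--     # One pass: count the hand's ranks into a dict, then pick the highest
--     # rank value among ranks counted exactly 3 (resp. exactly 2) via max.
--     counts = {}
--     for card in cards:
--         r = card[:-1]
--         counts[r] = counts.get(r, 0) + 1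
--     three_of_a_kind = max(
--         (rank_values[r] for r in counts if r in rank_values and counts[r] == 3),
--         default=None)
--     pair = max(
--         (rank_values[r] for r in counts if r in rank_values and counts[r] == 2),
--         default=None)
--     return [three_of_a_kind, pair]
-- ===== Notes on version B (the rewrite author's own statement) =====
-- stated objective: simpler
-- what changed: B counts the hand's ranks into a dict in one pass and selects the trips/pair values with max over the hand's distinct ranks, instead of A's scan over the fixed 13-rank list with a repeated list.count per rank and last-write-wins.
import Mathlib
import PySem

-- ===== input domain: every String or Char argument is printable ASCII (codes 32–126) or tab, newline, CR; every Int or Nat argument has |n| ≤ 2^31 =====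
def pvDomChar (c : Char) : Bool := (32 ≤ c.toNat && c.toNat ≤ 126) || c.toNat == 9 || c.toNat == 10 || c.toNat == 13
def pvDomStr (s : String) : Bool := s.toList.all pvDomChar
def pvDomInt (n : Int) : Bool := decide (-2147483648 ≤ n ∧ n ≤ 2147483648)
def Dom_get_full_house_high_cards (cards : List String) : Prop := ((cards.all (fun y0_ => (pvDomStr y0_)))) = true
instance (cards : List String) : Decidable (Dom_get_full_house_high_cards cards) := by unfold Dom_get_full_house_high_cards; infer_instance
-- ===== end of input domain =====

-- B replaces A's fixed 13-rank scan (a list.count per rank, last write wins) by a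
-- one-pass dict count plus max over the hand's distinct ranks; objective: simpler.

-- ===== PORT A =====
-- ranks = ['2', …, 'A']
def ranksL : List String := ["2", "3", "4", "5", "6", "7", "8", "9", "T", "J", "Q", "K", "A"]

-- rank_values = {rank: index for index, rank in enumerate(ranks, start=2)}
def rankValues : PySem.Dict String Int :=
  PySem.Dict.ofList ((PySem.List.enumerate ranksL 2).map (fun p => (p.2, p.1)))

-- port of A; rank_values[rank] is ported as getD (exact: the key is always present, rank ∈ ranks)
def get_full_house_high_cards (cards : List String) : List (Option Int) :=
  let ranks_in_hand := cards.map (fun card => PySem.Str.slice card none (some (-1)))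
  let st := ranksL.foldl (fun (st : Option Int × Option Int) rank =>
    if ranks_in_hand.count rank = 3 then (some (rankValues.getD rank 0), st.2)
    else if ranks_in_hand.count rank = 2 then (st.1, some (rankValues.getD rank 0))
    else st) (none, none)
  [st.1, st.2]

-- ===== PORT B =====
-- port of B; rank_values[r]/counts[r] under the filter are ported as getD (exact: keys present there)
def get_full_house_high_cards_alt (cards : List String) : List (Option Int) :=
  let counts := cards.foldl (fun (d : PySem.Dict String Int) card =>
      let r := PySem.Str.slice card none (some (-1))
      d.insert r (d.getD r 0 + 1)) PySem.Dict.empty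
  let three := PySem.List.max?
    ((counts.keys.filter (fun r => rankValues.contains r && counts.getD r 0 == (3 : Int))).map
      (fun r => rankValues.getD r 0)) (fun x => x)
  let pair := PySem.List.max?
    ((counts.keys.filter (fun r => rankValues.contains r && counts.getD r 0 == (2 : Int))).map
      (fun r => rankValues.getD r 0)) (fun x => x)
  [three, pair]

-- ===== PRECONDITION & SPEC =====
def Spec_get_full_house_high_cards (cards : List String) (out : List (Option Int)) : Prop := out = get_full_house_high_cards_alt cards
instance (cards : List String) (out : List (Option Int)) : Decidable (Spec_get_full_house_high_cards cards out) := by unfold Spec_get_full_house_high_cards; infer_instance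

-- ===== CLAIM (what is proved, stated in full; the proofs are below) =====
def Claim_equal_get_full_house_high_cards : Prop := ∀ (cards : List String), Dom_get_full_house_high_cards cards → Spec_get_full_house_high_cards cards (get_full_house_high_cards cards)

-- ===== LEMMAS AND PROOFS =====

-- rank_values membership is exactly membership in ranks
theorem rv_contains_iff (r : String) : rankValues.contains r = true ↔ r ∈ ranksL := by
  by_cases h : r ∈ ranksL
  · simp only [ranksL, List.mem_cons, List.not_mem_nil, or_false] at h
    rcases h with rfl|rfl|rfl|rfl|rfl|rfl|rfl|rfl|rfl|rfl|rfl|rfl|rfl <;> simp [ranksL] <;> decide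
  · simp only [h, iff_false]
    simp only [ranksL, List.mem_cons, List.not_mem_nil, or_false, not_or] at h
    obtain ⟨h1,h2,h3,h4,h5,h6,h7,h8,h9,h10,h11,h12,h13⟩ := h
    show ¬ _
    intro hc
    rw [show rankValues = PySem.Dict.mk [("2",2),("3",3),("4",4),("5",5),("6",6),("7",7),("8",8),("9",9),("T",10),("J",11),("Q",12),("K",13),("A",14)] from by decide] at hc
    simp [PySem.Dict.contains_mk] at hc
    rcases hc with h|h|h|h|h|h|h|h|h|h|h|h|h <;> simp_all

-- the rank values are strictly increasing along ranks
theorem ranks_val_pairwise : ranksL.Pairwise (fun a b => rankValues.getD a 0 < rankValues.getD b 0) := by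
  decide

-- last-write-wins fold = getLast? of the filtered, mapped list
theorem foldl_lastwins {α : Type} (l : List α) (p : α → Bool) (v : α → Int) (init : Option Int) :
    l.foldl (fun s x => if p x then some (v x) else s) init
      = (((l.filter p).map (fun x => some (v x))).getLast?).getD init := by
  induction l generalizing init with
  | nil => rfl
  | cons x xs ih =>
    by_cases hp : p x
    · simp only [List.foldl_cons, hp, if_true, List.filter_cons_of_pos hp, List.map_cons]
      rw [ih]
      cases hfe : (xs.filter p).map (fun x => some (v x)) with
      | nil => simp [hfe]
      | cons a t =>
        cases h2 : (a :: t).getLast? with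
        | none => simp [List.getLast?_eq_none_iff] at h2
        | some z => simp [h2]
    · simp only [List.foldl_cons, hp, List.filter_cons_of_neg hp]
      exact ih init

-- the same with a decidable Prop predicate, as the port writes it
theorem foldl_lastwins' {α : Type} (l : List α) (P : α → Prop) [DecidablePred P] (v : α → Int) (init : Option Int) :
    l.foldl (fun s x => if P x then some (v x) else s) init
      = (((l.filter (fun x => decide (P x))).map (fun x => some (v x))).getLast?).getD init := by
  have := foldl_lastwins l (fun x => decide (P x)) v init
  simpa using this

theorem getLast?_map_some {α : Type} (l : List α) (v : α → Int) :
    (((l.map (fun x => some (v x))).getLast?).getD none : Option Int) = (l.map v).getLast? := by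
  have : l.map (fun x => some (v x)) = (l.map v).map some := by simp [List.map_map]
  rw [this, List.getLast?_map]
  cases (l.map v).getLast? <;> simp

-- in a strictly increasing list the last element is the maximum
theorem getLast?_max (l : List Int) (h : l.Pairwise (· < ·)) (m : Int) (hm : l.getLast? = some m) :
    m ∈ l ∧ ∀ y ∈ l, y ≤ m := by
  induction l with
  | nil => simp at hm
  | cons x xs ih =>
    rcases List.pairwise_cons.mp h with ⟨hx, hxs⟩
    cases xs with
    | nil => simp at hm; subst hm; simp
    | cons a t =>
      rw [List.getLast?_cons_cons] at hm
      obtain ⟨hmem, hmax⟩ := ih hxs hm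
      refine ⟨List.mem_cons_of_mem _ hmem, ?_⟩
      intro y hy
      rcases List.mem_cons.mp hy with rfl | hy
      · exact le_of_lt (hx m hmem)
      · exact hmax y hy

-- getLast? of a strictly increasing list = max? of any list with the same members
theorem last_eq_max (A B : List Int) (hA : A.Pairwise (· < ·)) (hmem : ∀ x, x ∈ A ↔ x ∈ B) :
    A.getLast? = PySem.List.max? B (fun x => x) := by
  cases hAl : A.getLast? with
  | none =>
    have hAe : A = [] := List.getLast?_eq_none_iff.mp hAl
    have hBe : B = [] := List.eq_nil_iff_forall_not_mem.mpr (fun x hx => by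
      have := (hmem x).mpr hx; simp [hAe] at this)
    rw [hBe]
    exact ((PySem.List.max?_eq_none_iff [] _).mpr rfl).symm
  | some m =>
    obtain ⟨hmA, hmax⟩ := getLast?_max A hA m hAl
    have hmB : m ∈ B := (hmem m).mp hmA
    cases hB : PySem.List.max? B (fun x => x) with
    | none => rw [PySem.List.max?_eq_none_iff] at hB; simp [hB] at hmB
    | some m' =>
      have h1 : m ≤ m' := PySem.List.max?_isMax hB m hmB
      have h2 : m' ≤ m := hmax m' ((hmem m').mpr (PySem.List.max?_mem hB))
      have : m = m' := le_antisymm h1 h2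
      rw [this]

-- the two selection strategies agree, per component
theorem comp_eq (rih : List String) (c : Nat) (hc : 0 < c) :
    ranksL.foldl (fun s r => if rih.count r = c then some (rankValues.getD r 0) else s) none
      = PySem.List.max?
          (((PySem.Dict.counter rih).keys.filter
              (fun r => rankValues.contains r && (PySem.Dict.counter rih).getD r 0 == (c : Int))).map
            (fun r => rankValues.getD r 0)) (fun x => x) := by
  rw [foldl_lastwins' ranksL (fun r => rih.count r = c) (fun r => rankValues.getD r 0) none,
      getLast?_map_some]
  apply last_eq_max
  · exact List.pairwise_map.mpr (ranks_val_pairwise.sublist List.filter_sublist)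
  · intro x
    simp only [List.mem_map, List.mem_filter, PySem.Dict.keys_counter, PySem.Set.mem_ofList,
      PySem.Dict.getD_counter, Bool.and_eq_true, beq_iff_eq, decide_eq_true_eq]
    constructor
    · rintro ⟨r, ⟨hr, hcnt⟩, rfl⟩
      refine ⟨r, ⟨?_, rv_contains_iff r |>.mpr hr, by exact_mod_cast congrArg (Nat.cast : Nat → Int) hcnt⟩, rfl⟩
      have : 0 < rih.count r := by omega
      exact List.count_pos_iff.mp this
    · rintro ⟨r, ⟨hmem, hcont, hcnt⟩, rfl⟩
      refine ⟨r, ⟨(rv_contains_iff r).mp hcont, by exact_mod_cast hcnt⟩, rfl⟩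

-- a product-state fold with independent components splits into two folds
theorem foldl_pair_split {α β γ : Type} (l : List α) (f : β → α → β) (g : γ → α → γ) (a : β) (b : γ) :
    l.foldl (fun st x => (f st.1 x, g st.2 x)) (a, b) = (l.foldl f a, l.foldl g b) := by
  induction l generalizing a b with
  | nil => rfl
  | cons x xs ih => simpa using ih (f a x) (g b x)

theorem main_spec (cards : List String) :
    get_full_house_high_cards cards = get_full_house_high_cards_alt cards := by
  simp only [get_full_house_high_cards, get_full_house_high_cards_alt]
  have hcounts : cards.foldl (fun (d : PySem.Dict String Int) card =>
      d.insert (PySem.Str.slice card none (some (-1)))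
        (d.getD (PySem.Str.slice card none (some (-1))) 0 + 1)) PySem.Dict.empty
      = PySem.Dict.counter (cards.map (fun card => PySem.Str.slice card none (some (-1)))) := by
    rw [← PySem.Dict.foldl_insert_getD_add_one_eq_counter, List.foldl_map]
  rw [hcounts]
  set rih := cards.map (fun card => PySem.Str.slice card none (some (-1))) with hrih
  have hstep : (fun (st : Option Int × Option Int) rank =>
      if rih.count rank = 3 then (some (rankValues.getD rank 0), st.2)
      else if rih.count rank = 2 then (st.1, some (rankValues.getD rank 0))
      else st)
    = (fun (st : Option Int × Option Int) rank =>
      ((if rih.count rank = 3 then some (rankValues.getD rank 0) else st.1),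
       (if rih.count rank = 2 then some (rankValues.getD rank 0) else st.2))) := by
    funext st r
    by_cases h3 : rih.count r = 3 <;> by_cases h2 : rih.count r = 2
    · omega
    · simp [h3]
    · simp [h3, h2]
    · simp [h3, h2]
  rw [hstep, foldl_pair_split ranksL
      (fun s r => if rih.count r = 3 then some (rankValues.getD r 0) else s)
      (fun s r => if rih.count r = 2 then some (rankValues.getD r 0) else s) none none]
  have e3 := comp_eq rih 3 (by omega)
  have e2 := comp_eq rih 2 (by omega)
  norm_num at e3 e2
  simp only [PySem.Dict.keys_counter, PySem.Dict.getD_counter]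
  rw [e3, e2]

-- ===== VERDICT (by name: the statement is the Claim_ definition above) =====
theorem get_full_house_high_cards_spec : Claim_equal_get_full_house_high_cards := by
  intro cards _
  unfold Spec_get_full_house_high_cards
  exact main_spec cards
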